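-- pv_equiv track=rewrite | github.com/asah/tents-and-trees | tents-and-trees.py | compute_sums
-- ===== SOURCE A (Python) =====
-- TENT='t'
--
-- def board_height(board):
--   return len(board)
--
-- def board_width(board):
--   return len(board[0])
--
-- def compute_sums(board):
--   rowsums = [0] * board_height(board)
--   colsums = [0] * board_width(board)
--   for y in range(board_height(board)):
--     for x in range(board_width(board)):
--       if board[y][x] == TENT:
--         colsums[x] += 1
--         rowsums[y] += 1
--   return rowsums, colsums
-- ===== SOURCE B (Python) =====
-- TENT='t'
--
-- def compute_sums(board):
--   width = len(board[0])
--   rowsums = [sum(1 for x in range(width) if row[x] == TENT) for row in board]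
--   colsums = [sum(1 for row in board if row[x] == TENT) for x in range(width)]
--   return rowsums, colsums
-- ===== Notes on version B (the rewrite author's own statement) =====
-- stated objective: simpler
-- what changed: Replaces the nested index loops mutating a shared pair of accumulator arrays by two independent comprehension passes: a per-row count over the board width and a column-major per-column count; Pre_ excludes only boards on which A raises IndexError (empty board, or a row shorter than the first row).
import Mathlib
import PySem

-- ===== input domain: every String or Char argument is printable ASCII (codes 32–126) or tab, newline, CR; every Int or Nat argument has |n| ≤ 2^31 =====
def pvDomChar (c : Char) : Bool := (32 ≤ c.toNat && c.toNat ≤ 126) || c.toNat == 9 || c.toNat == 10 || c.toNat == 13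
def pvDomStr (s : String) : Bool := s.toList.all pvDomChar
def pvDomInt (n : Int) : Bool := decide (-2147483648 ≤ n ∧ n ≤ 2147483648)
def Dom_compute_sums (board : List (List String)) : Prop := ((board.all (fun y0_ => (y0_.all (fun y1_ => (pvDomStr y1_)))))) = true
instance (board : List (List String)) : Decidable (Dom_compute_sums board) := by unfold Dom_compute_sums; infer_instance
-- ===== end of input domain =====

-- B replaces A's nested index loops over a shared pair of accumulator arrays by two
-- independent comprehension passes: per-row counts over the board width, and a
-- column-major per-column count.

-- ===== PORT A =====
-- nested 'for y in range(h): for x in range(w):' loops mutating rowsums/colsums in place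
def compute_sums (board : List (List String)) : List Int × List Int :=
  let rowsums : List Int := List.replicate board.length 0
  let colsums : List Int := List.replicate (PySem.List.pyGetD board 0 []).length 0
  (PySem.List.pyRange 0 (board.length : Int) 1).foldl (fun st y =>
    (PySem.List.pyRange 0 ((PySem.List.pyGetD board 0 []).length : Int) 1).foldl (fun st x =>
      if PySem.List.pyGetD (PySem.List.pyGetD board y []) x "" = "t" then
        (PySem.List.pySetD st.1 y (PySem.List.pyGetD st.1 y 0 + 1),
         PySem.List.pySetD st.2 x (PySem.List.pyGetD st.2 x 0 + 1))
      else st) st) (rowsums, colsums)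

-- ===== PORT B =====
-- two comprehensions: 'sum(1 for x in range(width) if row[x] == TENT)' per row
-- (a 0/1-sum is a countP), and 'sum(1 for row in board if row[x] == TENT)' per column
def compute_sums_alt (board : List (List String)) : List Int × List Int :=
  let width : Int := ((PySem.List.pyGetD board 0 []).length : Int)
  let rowsums : List Int := board.map (fun row =>
    (((PySem.List.pyRange 0 width 1).countP (fun x => PySem.List.pyGetD row x "" == "t")) : Int))
  let colsums : List Int := (PySem.List.pyRange 0 width 1).map (fun x =>
    ((board.countP (fun row => PySem.List.pyGetD row x "" == "t")) : Int))
  (rowsums, colsums)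

-- ===== PRECONDITION & SPEC =====
-- Pre_ holds exactly where Python A returns: A raises IndexError on an empty board (board[0])
-- and on a board with a row shorter than the first row (board[y][x] with x < len(board[0])).
def Pre_compute_sums (board : List (List String)) : Prop :=
  board ≠ [] ∧ ∀ r ∈ board, (board.headD []).length ≤ r.length
instance (board : List (List String)) : Decidable (Pre_compute_sums board) := by
  unfold Pre_compute_sums; infer_instance

def pvWitness_compute_sums : List (List String) := [["t", "."], [".", "t"]]

def Spec_compute_sums (board : List (List String)) (out : List Int × List Int) : Prop := out = compute_sums_alt board
instance (board : List (List String)) (out : List Int × List Int) : Decidable (Spec_compute_sums board out) := by unfold Spec_compute_sums; infer_instance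

-- ===== CLAIM (what is proved, stated in full; the proofs are below) =====
def Claim_equal_compute_sums : Prop := ∀ (board : List (List String)), Dom_compute_sums board → Pre_compute_sums board → Spec_compute_sums board (compute_sums board)

-- ===== LEMMAS AND PROOFS =====

-- A's inner-loop body as a named function (definitionally the lambda in compute_sums)
def pvF (row : List String) (y : Int) : (List Int × List Int) → Int → (List Int × List Int) :=
  fun st x => if PySem.List.pyGetD row x "" = "t" then
      (PySem.List.pySetD st.1 y (PySem.List.pyGetD st.1 y 0 + 1),
       PySem.List.pySetD st.2 x (PySem.List.pyGetD st.2 x 0 + 1))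
    else st

lemma inner_spec (row : List String) (y : Int) (hy0 : 0 ≤ y) (w' : Nat) (rs cs : List Int) :
    (∀ j : Nat, ((PySem.List.pyRange 0 (w' : Int) 1).foldl (pvF row y) (rs, cs)).1[j]?
        = rs[j]?.map (fun v => v + if (j : Int) = y then ((row.take w').count "t" : Int) else 0))
  ∧ (∀ j : Nat, ((PySem.List.pyRange 0 (w' : Int) 1).foldl (pvF row y) (rs, cs)).2[j]?
        = cs[j]?.map (fun v => v + if j < w' ∧ row[j]? = some "t" then 1 else 0)) := by
  induction w' with
  | zero =>
    constructor <;> intro j <;>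
      simp [PySem.List.pyRange_one_eq_nil]
  | succ w ih =>
    obtain ⟨ih1, ih2⟩ := ih
    have hcast : ((w + 1 : Nat) : Int) = (w : Int) + 1 := by push_cast; ring
    rw [hcast, PySem.List.pyRange_one_succ_right (by positivity), List.foldl_append]
    set prev := (PySem.List.pyRange 0 (w : Int) 1).foldl (pvF row y) (rs, cs) with hprev
    have hlen1 : prev.1.length = rs.length := by
      have := List.ext_getElem? (l₁ := prev.1)
        (l₂ := rs.mapIdx (fun j v => v + if (j : Int) = y then ((row.take w).count "t" : Int) else 0))
        (by intro i; rw [ih1 i, List.getElem?_mapIdx])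
      simp [this]
    have hlen2 : prev.2.length = cs.length := by
      have := List.ext_getElem? (l₁ := prev.2)
        (l₂ := cs.mapIdx (fun j v => v + if j < w ∧ row[j]? = some "t" then 1 else 0))
        (by intro i; rw [ih2 i, List.getElem?_mapIdx])
      simp [this]
    simp only [List.foldl_cons, List.foldl_nil]
    by_cases ht : PySem.List.pyGetD row (w : Int) "" = "t"
    · -- cell is a tent: both components get bumped
      have hwlt : w < row.length := by
        by_contra hge
        rw [PySem.List.pyGetD_natCast, List.getD_eq_getElem?_getD,
            List.getElem?_eq_none (by omega)] at ht
        simp at ht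
      have hrow : row[w]? = some "t" := by
        rw [PySem.List.pyGetD_natCast, List.getD_eq_getElem?_getD,
            List.getElem?_eq_some_iff.mpr ⟨hwlt, rfl⟩] at ht
        simp at ht
        rw [List.getElem?_eq_some_iff.mpr ⟨hwlt, rfl⟩, ht]
      have hcnt : ((row.take (w + 1)).count "t" : Int) = ((row.take w).count "t" : Int) + 1 := by
        rw [List.take_succ, List.count_append, hrow]
        push_cast
        simp [List.count_cons]
      rw [pvF]
      simp only [ht, if_true]
      constructor
      · intro j
        rw [PySem.List.pySetD_of_nonneg _ _ hy0, List.getElem?_set]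
        by_cases hj : y.toNat = j
        · subst hj
          simp only [if_pos rfl]
          by_cases hjl : y.toNat < prev.1.length
          · rw [if_pos hjl, ih1 y.toNat]
            have hjy : ((y.toNat : Nat) : Int) = y := Int.toNat_of_nonneg hy0
            have hrs : y.toNat < rs.length := hlen1 ▸ hjl
            have hpg : PySem.List.pyGetD prev.1 y 0 = prev.1.getD y.toNat 0 := by
              conv_lhs => rw [← hjy]
              rw [PySem.List.pyGetD_natCast]
            rw [hpg, List.getD_eq_getElem?_getD, ih1 y.toNat,
                List.getElem?_eq_some_iff.mpr ⟨hrs, rfl⟩]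
            simp [hjy, hcnt]
            ring
          · rw [if_neg hjl]
            rw [List.getElem?_eq_none (l := rs) (i := y.toNat) (by omega)]
            simp
        · rw [if_neg hj, ih1 j]
          have hne : ¬ ((j : Int) = y) := by omega
          simp [hne]
      · intro j
        rw [PySem.List.pySetD_natCast, List.getElem?_set]
        by_cases hj : w = j
        · subst hj
          by_cases hjl : w < prev.2.length
          · rw [if_pos rfl, if_pos hjl]
            have hcs : w < cs.length := hlen2 ▸ hjl
            have hpg : PySem.List.pyGetD prev.2 (w : Int) 0 = prev.2.getD w 0 := by
              rw [PySem.List.pyGetD_natCast]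
            rw [hpg, List.getD_eq_getElem?_getD, ih2 w,
                List.getElem?_eq_some_iff.mpr ⟨hcs, rfl⟩]
            simp [hrow]
          · rw [if_pos rfl, if_neg hjl]
            rw [List.getElem?_eq_none (l := cs) (i := w) (by omega)]
            simp
        · rw [if_neg hj, ih2 j]
          have hiff : (j ≤ w ∧ row[j]? = some "t") ↔ (j < w ∧ row[j]? = some "t") := by
            constructor
            · rintro ⟨h1, h2⟩; exact ⟨by omega, h2⟩
            · rintro ⟨h1, h2⟩; exact ⟨by omega, h2⟩
          simp [Nat.lt_succ_iff, hiff]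
    · -- not a tent: state unchanged, count unchanged
      have hrow : ¬ (row[w]? = some "t") := by
        intro hc
        have hwlt : w < row.length := by
          by_contra hge
          rw [List.getElem?_eq_none (by omega)] at hc
          simp at hc
        rw [PySem.List.pyGetD_natCast, List.getD_eq_getElem?_getD, hc] at ht
        simp at ht
      have hcnt : (row.take (w + 1)).count "t" = (row.take w).count "t" := by
        rw [List.take_succ, List.count_append]
        cases hx : row[w]? with
        | none => simp
        | some s =>
          have : s ≠ "t" := by intro he; exact hrow (he ▸ hx)
          simp [List.count_cons, this]
      rw [pvF]
      simp only [ht, if_false]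
      constructor
      · intro j; rw [ih1 j, hcnt]
      · intro j
        rw [ih2 j]
        have hiff : (j ≤ w ∧ row[j]? = some "t") ↔ (j < w ∧ row[j]? = some "t") := by
          constructor
          · rintro ⟨h1, h2⟩
            refine ⟨?_, h2⟩
            rcases Nat.lt_or_ge j w with h | h
            · exact h
            · have hjw : j = w := by omega
              subst hjw; exact absurd h2 hrow
          · rintro ⟨h1, h2⟩; exact ⟨by omega, h2⟩
        simp [Nat.lt_succ_iff, hiff]

def pvHit (w j : Nat) (r : List String) : Bool := decide (j < w ∧ r[j]? = some "t")

lemma outer_spec (board : List (List String)) (w : Nat) (m : Nat) (rs cs : List Int) :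
    (∀ j : Nat, ((PySem.List.pyRange 0 (m : Int) 1).foldl
        (fun st y => (PySem.List.pyRange 0 (w : Int) 1).foldl (pvF (PySem.List.pyGetD board y []) y) st)
        (rs, cs)).1[j]?
      = rs[j]?.map (fun v => v + if j < m then (((board.getD j []).take w).count "t" : Int) else 0))
  ∧ (∀ j : Nat, ((PySem.List.pyRange 0 (m : Int) 1).foldl
        (fun st y => (PySem.List.pyRange 0 (w : Int) 1).foldl (pvF (PySem.List.pyGetD board y []) y) st)
        (rs, cs)).2[j]?
      = cs[j]?.map (fun v => v + (((board.take m).countP (pvHit w j) : Nat) : Int))) := by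
  induction m with
  | zero =>
    constructor <;> intro j <;> simp [PySem.List.pyRange_one_eq_nil]
  | succ m ih =>
    obtain ⟨ih1, ih2⟩ := ih
    have hcast : ((m + 1 : Nat) : Int) = (m : Int) + 1 := by push_cast; ring
    rw [hcast, PySem.List.pyRange_one_succ_right (by positivity), List.foldl_append]
    set prevO := (PySem.List.pyRange 0 (m : Int) 1).foldl
        (fun st y => (PySem.List.pyRange 0 (w : Int) 1).foldl (pvF (PySem.List.pyGetD board y []) y) st)
        (rs, cs) with hprevO
    simp only [List.foldl_cons, List.foldl_nil]
    have hinner := inner_spec (PySem.List.pyGetD board (m : Int) []) (m : Int) (by positivity) w prevO.1 prevO.2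
    have hrowm : PySem.List.pyGetD board (m : Int) [] = board.getD m [] := by
      rw [PySem.List.pyGetD_natCast]
    constructor
    · intro j
      rw [hinner.1 j, ih1 j]
      cases hx : rs[j]? with
      | none => simp
      | some v =>
        simp only [Option.map_some]
        by_cases hj : j = m
        · subst hj
          simp [hrowm]
        · by_cases hjm : j < m
          · have h1 : j < m + 1 := by omega
            have h2 : ¬ ((j : Int) = (m : Int)) := by omega
            simp [hjm, h1, h2]
          · have h1 : ¬ (j < m + 1) := by omega
            have h2 : ¬ ((j : Int) = (m : Int)) := by omega
            simp [hjm, h1, h2]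
    · intro j
      rw [hinner.2 j, ih2 j]
      cases hx : cs[j]? with
      | none => simp
      | some v =>
        simp only [Option.map_some]
        rw [List.take_succ, List.countP_append]
        cases hb : board[m]? with
        | none =>
          have : board.getD m [] = [] := by
            rw [List.getD_eq_getElem?_getD, hb]; rfl
          simp [hrowm, this, hb]
        | some r =>
          have hgd : board.getD m [] = r := by
            rw [List.getD_eq_getElem?_getD, hb]; rfl
          by_cases hh : j < w ∧ r[j]? = some "t"
          · simp [hrowm, hgd, pvHit, hh, hb]
            push_cast
            omega
          · simp [hrowm, hgd, pvHit, hh, hb]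

-- B's row pass: the 0/1-count over range(width) is the count of "t" in the first w cells
lemma rowcount_spec (row : List String) (w : Nat) (hw : w ≤ row.length) :
    (PySem.List.pyRange 0 (w : Int) 1).countP (fun x => PySem.List.pyGetD row x "" == "t")
      = (row.take w).count "t" := by
  induction w with
  | zero => simp [PySem.List.pyRange_one_eq_nil]
  | succ w ih =>
    have hcast : ((w + 1 : Nat) : Int) = (w : Int) + 1 := by push_cast; ring
    rw [hcast, PySem.List.pyRange_one_succ_right (by positivity), List.countP_append,
        ih (by omega), List.take_succ, List.count_append]
    have hwlt : w < row.length := by omega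
    have hget : row[w]? = some row[w] := List.getElem?_eq_some_iff.mpr ⟨hwlt, rfl⟩
    have hgd : PySem.List.pyGetD row (w : Int) "" = row[w] := by
      rw [PySem.List.pyGetD_natCast, List.getD_eq_getElem?_getD, hget]; rfl
    by_cases ht : row[w] = "t"
    · simp [hget, ht, hgd, List.count_cons]
    · simp [hget, ht, hgd, List.count_cons]

-- B's column pass: the per-column predicate agrees with pvHit on rows of length ≥ w
lemma colcount_spec (board : List (List String)) (w j : Nat) (hj : j < w)
    (hall : ∀ r ∈ board, w ≤ r.length) :
    board.countP (fun row => PySem.List.pyGetD row (j : Int) "" == "t")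
      = board.countP (pvHit w j) := by
  refine List.countP_congr (fun r hr => ?_)
  have hjr : j < r.length := by have := hall r hr; omega
  have hget : r[j]? = some r[j] := List.getElem?_eq_some_iff.mpr ⟨hjr, rfl⟩
  have hgd : PySem.List.pyGetD r (j : Int) "" = r[j] := by
    rw [PySem.List.pyGetD_natCast, List.getD_eq_getElem?_getD, hget]; rfl
  simp [pvHit, hgd, hget, hj]

lemma getD_zero_eq_headD (board : List (List String)) (h : board ≠ []) :
    PySem.List.pyGetD board 0 [] = board.headD [] := by
  cases board with
  | nil => exact absurd rfl h
  | cons r rest => simp [PySem.List.pyGetD_zero]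

theorem final_eq (board : List (List String)) (hne : board ≠ [])
    (hall : ∀ r ∈ board, (board.headD []).length ≤ r.length) :
    compute_sums board = compute_sums_alt board := by
  set w : Nat := (board.headD []).length with hw
  set n : Nat := board.length with hn
  have hgd0 : PySem.List.pyGetD board 0 [] = board.headD [] := getD_zero_eq_headD board hne
  have hA : compute_sums board
      = (PySem.List.pyRange 0 (n : Int) 1).foldl
          (fun st y => (PySem.List.pyRange 0 (w : Int) 1).foldl
            (pvF (PySem.List.pyGetD board y []) y) st)
          (List.replicate n 0, List.replicate w 0) := by
    unfold compute_sums pvF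
    rw [hgd0]
  have hB : compute_sums_alt board
      = (board.map (fun row =>
            (((PySem.List.pyRange 0 (w : Int) 1).countP
                (fun x => PySem.List.pyGetD row x "" == "t")) : Int)),
         (PySem.List.pyRange 0 (w : Int) 1).map (fun x =>
            ((board.countP (fun row => PySem.List.pyGetD row x "" == "t")) : Int))) := by
    unfold compute_sums_alt
    rw [hgd0]
  obtain ⟨hO1, hO2⟩ := outer_spec board w n (List.replicate n 0) (List.replicate w 0)
  rw [hA, hB]
  refine Prod.ext ?_ ?_
  · refine List.ext_getElem? (fun j => ?_)
    rw [hO1 j, List.getElem?_map]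
    by_cases hj : j < n
    · have hb : board[j]? = some board[j] := List.getElem?_eq_some_iff.mpr ⟨hj, rfl⟩
      have hrep : (List.replicate n (0 : Int))[j]? = some 0 := by
        simp [List.getElem?_replicate, hj]
      have hmem : board[j] ∈ board := List.getElem_mem hj
      have hgd : board.getD j [] = board[j] := by
        rw [List.getD_eq_getElem?_getD, hb]; rfl
      rw [hb, hrep]
      simp only [Option.map_some]
      rw [rowcount_spec board[j] w (hall _ hmem)]
      simp [hj, hgd, hb]
    · rw [List.getElem?_eq_none (l := board) (by omega),
          List.getElem?_eq_none (l := List.replicate n (0 : Int)) (by simpa using hj)]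
      simp
  · refine List.ext_getElem? (fun j => ?_)
    rw [hO2 j, List.getElem?_map]
    by_cases hj : j < w
    · have hr : (PySem.List.pyRange 0 (w : Int) 1)[j]? = some (j : Int) := by
        rw [PySem.List.getElem?_pyRange_one] <;> simp [hj]
      have hrep : (List.replicate w (0 : Int))[j]? = some 0 := by
        simp [List.getElem?_replicate, hj]
      have htk : board.take n = board := by simp [hn]
      rw [hr, hrep]
      simp only [Option.map_some]
      rw [colcount_spec board w j hj hall, htk]
      simp
    · have hlen : (PySem.List.pyRange 0 (w : Int) 1).length = w := by
        rw [PySem.List.length_pyRange_one]; simp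
      rw [List.getElem?_eq_none (l := PySem.List.pyRange 0 (w : Int) 1) (by omega),
          List.getElem?_eq_none (l := List.replicate w (0 : Int)) (by simpa using hj)]
      simp

-- ===== VERDICT (by name: the statement is the Claim_ definition above) =====
theorem compute_sums_spec : Claim_equal_compute_sums := by
  intro board _ hpre
  obtain ⟨hne, hall⟩ := hpre
  unfold Spec_compute_sums
  exact final_eq board hne hall
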